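-- pv_equiv track=rewrite | github.com/yoon-asha/JSBeginner | week13/ex2_taeho.py | solution
-- ===== SOURCE A (Python) =====
-- from collections import defaultdict
-- from collections import deque
--
-- def solution(wants, numbers, discount):
--
--     count = 0
--     q = deque()
--     discount_dict = defaultdict(int)
--
--     for item in discount:
--         if len(q) == 10:
--             discount_dict[q.popleft()] -= 1
--         q.append(item)
--         discount_dict[item] += 1
--         if all([discount_dict[want] >= number
--                 for want,number in zip(wants,numbers)]):
--             count += 1
--     return count
-- ===== SOURCE B (Python) =====
-- def solution(wants, numbers, discount):
--     # Precompute, per wanted item, the strongest requirement; then slide the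
--     # 10-wide window once, maintaining an incremental count of satisfied wants.
--     need = {}
--     for w, n in zip(wants, numbers):
--         if w not in need or n > need[w]:
--             need[w] = n
--     target = len(need)
--     sat = sum(1 for n in need.values() if n <= 0)
--     cnt = {}
--     count = 0
--     for i, item in enumerate(discount):
--         if i >= 10:
--             old = discount[i - 10]
--             c = cnt.get(old, 0)
--             cnt[old] = c - 1
--             m = need.get(old)
--             if m is not None and m == c:
--                 sat -= 1
--         c = cnt.get(item, 0)
--         cnt[item] = c + 1
--         m = need.get(item)
--         if m is not None and m == c + 1:
--             sat += 1
--         if sat == target: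
--             count += 1
--     return count
-- ===== Notes on version B (the rewrite author's own statement) =====
-- stated objective: faster
-- what changed: B precomputes one per-item maximum-requirement dict from zip(wants, numbers) and maintains an incremental count of satisfied wants, updated only for the item entering and the item leaving the 10-wide window, instead of A's rescan of every (want, number) pair on each day.
import Mathlib
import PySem

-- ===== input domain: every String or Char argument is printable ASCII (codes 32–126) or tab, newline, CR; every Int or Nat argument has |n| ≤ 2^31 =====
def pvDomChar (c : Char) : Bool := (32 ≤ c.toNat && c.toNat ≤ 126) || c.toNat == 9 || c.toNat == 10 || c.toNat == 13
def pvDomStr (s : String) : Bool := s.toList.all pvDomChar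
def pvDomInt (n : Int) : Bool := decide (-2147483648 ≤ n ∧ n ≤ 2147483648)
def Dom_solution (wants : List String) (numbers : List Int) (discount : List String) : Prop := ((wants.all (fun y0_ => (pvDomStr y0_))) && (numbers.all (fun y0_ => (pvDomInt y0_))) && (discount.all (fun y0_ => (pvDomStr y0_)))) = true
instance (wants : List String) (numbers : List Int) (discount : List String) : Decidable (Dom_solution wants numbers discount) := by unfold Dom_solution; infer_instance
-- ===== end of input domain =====

-- B replaces A's per-day rescan of all wants by a precomputed requirement dict and an
-- incrementally maintained count of satisfied wants (objective: faster).

-- ===== PORT A =====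
-- one iteration of A's `for item in discount` loop; state = (count, q, discount_dict).
-- defaultdict reads are ported as getD _ 0 (a defaultdict read inserts the key with value 0,
-- which never changes any value read later, hence not the return value).
def solAStep (z : List (String × Int)) (st : Int × List String × PySem.Dict String Int)
    (item : String) : Int × List String × PySem.Dict String Int :=
  let (count, q, d) := st
  -- if len(q) == 10: discount_dict[q.popleft()] -= 1
  let (q, d) := if q.length == 10 then
      (q.tail, d.insert (q.headD "") (d.getD (q.headD "") 0 - 1))
    else (q, d)
  let q := q ++ [item]
  let d := d.insert item (d.getD item 0 + 1)
  -- if all([discount_dict[want] >= number for want, number in zip(wants, numbers)])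
  let count := if (z.map (fun p => decide (d.getD p.1 0 ≥ p.2))).all id then count + 1 else count
  (count, q, d)

def solution (wants : List String) (numbers : List Int) (discount : List String) : Int :=
  (discount.foldl (solAStep (wants.zip numbers)) (0, [], PySem.Dict.empty)).1

-- ===== PORT B =====
-- need = {}; for w, n in zip(wants, numbers): if w not in need or n > need[w]: need[w] = n
def solBNeed (pairs : List (String × Int)) : PySem.Dict String Int :=
  pairs.foldl (fun d p =>
    match d.get? p.1 with
    | none => d.insert p.1 p.2
    | some m => if p.2 > m then d.insert p.1 p.2 else d) PySem.Dict.empty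

-- one iteration of Source B's `for i, item in enumerate(discount)` loop; state = (count, cnt, sat)
def solBStep (need : PySem.Dict String Int) (target : Int) (discount : List String)
    (st : Int × PySem.Dict String Int × Int) (p : Int × String) :
    Int × PySem.Dict String Int × Int :=
  let (count, cnt, sat) := st
  let (i, item) := p
  let (cnt, sat) :=
    if i ≥ 10 then
      let old := PySem.List.pyGetD discount (i - 10) ""
      let c := cnt.getD old 0
      let cnt := cnt.insert old (c - 1)
      let sat := match need.get? old with
        | some m => if m = c then sat - 1 else sat
        | none => sat
      (cnt, sat)
    else (cnt, sat)
  let c := cnt.getD item 0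
  let cnt := cnt.insert item (c + 1)
  let sat := match need.get? item with
    | some m => if m = c + 1 then sat + 1 else sat
    | none => sat
  let count := if sat = target then count + 1 else count
  (count, cnt, sat)

def solution_alt (wants : List String) (numbers : List Int) (discount : List String) : Int :=
  let need := solBNeed (wants.zip numbers)
  let target : Int := (need.size : Int)
  -- sat = sum(1 for n in need.values() if n <= 0)
  let sat0 : Int := ((need.values.filter (fun n => decide (n ≤ 0))).length : Int)
  ((PySem.List.enumerate discount).foldl (solBStep need target discount)
    (0, PySem.Dict.empty, sat0)).1

-- ===== PRECONDITION & SPEC =====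
def Spec_solution (wants : List String) (numbers : List Int) (discount : List String) (out : Int) : Prop := out = solution_alt wants numbers discount
instance (wants : List String) (numbers : List Int) (discount : List String) (out : Int) : Decidable (Spec_solution wants numbers discount out) := by unfold Spec_solution; infer_instance

-- ===== CLAIM (what is proved, stated in full; the proofs are below) =====
def Claim_equal_solution : Prop := ∀ (wants : List String) (numbers : List Int) (discount : List String), Dom_solution wants numbers discount → Spec_solution wants numbers discount (solution wants numbers discount)

-- ===== LEMMAS AND PROOFS =====

-- the number of wants currently satisfied by the window counts `cnt`
def satOf (need cnt : PySem.Dict String Int) : Int :=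
  ((need.items.filter (fun p => decide (p.2 ≤ cnt.getD p.1 0))).length : Int)

lemma nodup_keys_solBNeed_aux (z : List (String × Int)) :
    ∀ d : PySem.Dict String Int, d.keys.Nodup →
    (z.foldl (fun d p =>
      match d.get? p.1 with
      | none => d.insert p.1 p.2
      | some m => if p.2 > m then d.insert p.1 p.2 else d) d).keys.Nodup := by
  induction z with
  | nil => intro d h; simpa using h
  | cons p t ih =>
    intro d h
    simp only [List.foldl_cons]
    apply ih
    cases hg : d.get? p.1 with
    | none => exact PySem.Dict.nodup_keys_insert d p.1 p.2 h
    | some m =>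
      by_cases hc : p.2 > m
      · simp [hc]; exact PySem.Dict.nodup_keys_insert d p.1 p.2 h
      · simp [hc]; exact h

lemma nodup_keys_solBNeed (z : List (String × Int)) : (solBNeed z).keys.Nodup := by
  exact nodup_keys_solBNeed_aux z PySem.Dict.empty (by simp)

lemma need_step_iff (cnt : PySem.Dict String Int) (d : PySem.Dict String Int)
    (hnd : d.keys.Nodup) (q : String × Int) :
    (∀ p ∈ ((match d.get? q.1 with
      | none => d.insert q.1 q.2
      | some m => if q.2 > m then d.insert q.1 q.2 else d) : PySem.Dict String Int).items,
        p.2 ≤ cnt.getD p.1 0)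
    ↔ ((∀ p ∈ d.items, p.2 ≤ cnt.getD p.1 0) ∧ q.2 ≤ cnt.getD q.1 0) := by
  cases hg : d.get? q.1 with
  | none =>
    simp only []
    constructor
    · intro h
      refine ⟨fun p hp => h p ?_, h (q.1, q.2) ?_⟩
      · rw [PySem.Dict.mem_items_insert]
        right
        refine ⟨hp, ?_⟩
        intro hk
        have := PySem.Dict.mem_keys_of_mem_items d hp
        rw [hk] at this
        rw [PySem.Dict.get?_eq_none_iff_not_mem_keys] at hg
        exact hg this
      · exact PySem.Dict.mem_items_insert_self d q.1 q.2
    · intro ⟨h1, h2⟩ p hp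
      rw [PySem.Dict.mem_items_insert] at hp
      rcases hp with rfl | ⟨hp, _⟩
      · exact h2
      · exact h1 p hp
  | some m =>
    have hqm : (q.1, m) ∈ d.items := PySem.Dict.mem_items_of_get?_eq_some d hg
    by_cases hc : q.2 > m
    · simp only [hc, if_pos]
      constructor
      · intro h
        have hqn : q.2 ≤ cnt.getD q.1 0 := h (q.1, q.2) (PySem.Dict.mem_items_insert_self d q.1 q.2)
        refine ⟨fun p hp => ?_, hqn⟩
        by_cases hk : p.1 = q.1
        · have : p.2 = m := by
            have := PySem.Dict.get?_of_mem_items d (k := p.1) (v := p.2) (by exact hp) hnd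
            rw [hk, hg] at this
            exact (Option.some_inj.mp this).symm
          rw [this, hk]
          omega
        · exact h p (by rw [PySem.Dict.mem_items_insert]; right; exact ⟨hp, hk⟩)
      · intro ⟨h1, h2⟩ p hp
        rw [PySem.Dict.mem_items_insert] at hp
        rcases hp with rfl | ⟨hp, _⟩
        · exact h2
        · exact h1 p hp
    · simp only [hc]
      constructor
      · intro h
        refine ⟨h, ?_⟩
        have h3 : m ≤ cnt.getD q.1 0 := h (q.1, m) hqm
        omega
      · exact fun ⟨h1, _⟩ => h1

lemma need_char_aux (cnt : PySem.Dict String Int) :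
    ∀ (z : List (String × Int)) (d : PySem.Dict String Int), d.keys.Nodup →
    ((∀ p ∈ (z.foldl (fun d p =>
        match d.get? p.1 with
        | none => d.insert p.1 p.2
        | some m => if p.2 > m then d.insert p.1 p.2 else d) d).items, p.2 ≤ cnt.getD p.1 0)
      ↔ ((∀ p ∈ d.items, p.2 ≤ cnt.getD p.1 0) ∧ (∀ p ∈ z, p.2 ≤ cnt.getD p.1 0))) := by
  intro z
  induction z with
  | nil => intro d _; simp
  | cons q t ih =>
    intro d hnd
    simp only [List.foldl_cons]
    have hnd' : ((match d.get? q.1 with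
      | none => d.insert q.1 q.2
      | some m => if q.2 > m then d.insert q.1 q.2 else d) : PySem.Dict String Int).keys.Nodup := by
      cases hg : d.get? q.1 with
      | none => exact PySem.Dict.nodup_keys_insert d q.1 q.2 hnd
      | some m =>
        by_cases hc : q.2 > m
        · simpa [hc] using PySem.Dict.nodup_keys_insert d q.1 q.2 hnd
        · simpa [hc] using hnd
    rw [ih _ hnd', need_step_iff cnt d hnd q]
    constructor
    · intro ⟨⟨h1, h2⟩, h3⟩
      refine ⟨h1, ?_⟩
      intro p hp
      rcases List.mem_cons.mp hp with rfl | hp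
      · exact h2
      · exact h3 p hp
    · intro ⟨h1, h23⟩
      simp only [List.mem_cons] at h23
      exact ⟨⟨h1, h23 q (Or.inl rfl)⟩, fun p hp => h23 p (Or.inr hp)⟩

lemma need_char (z : List (String × Int)) (cnt : PySem.Dict String Int) :
    (∀ p ∈ z, p.2 ≤ cnt.getD p.1 0) ↔ (∀ p ∈ (solBNeed z).items, p.2 ≤ cnt.getD p.1 0) := by
  have := need_char_aux cnt z PySem.Dict.empty (by simp)
  unfold solBNeed
  rw [this]
  simp [PySem.Dict.empty]

lemma satOf_eq_size_iff (need cnt : PySem.Dict String Int) :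
    satOf need cnt = (need.size : Int) ↔ ∀ p ∈ need.items, p.2 ≤ cnt.getD p.1 0 := by
  unfold satOf
  rw [show (need.size : Int) = (need.items.length : Int) from rfl]
  rw [Int.natCast_inj]
  rw [List.length_filter_eq_length_iff]
  simp

lemma filter_len_update {α : Type} (l : List α) (P Q : α → Bool) (a : α)
    (hnd : l.Nodup) (ha : a ∈ l) (hother : ∀ b ∈ l, b ≠ a → P b = Q b) :
    ((l.filter Q).length : Int) =
      ((l.filter P).length : Int) + (if Q a then 1 else 0) - (if P a then 1 else 0) := by
  induction l with
  | nil => simp at ha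
  | cons b t ih =>
    rcases List.mem_cons.mp ha with rfl | hat
    · have hbt : a ∉ t := (List.nodup_cons.mp hnd).1
      have heq : t.filter P = t.filter Q := by
        apply List.filter_congr
        intro x hx
        exact hother x (List.mem_cons_of_mem a hx) (fun h => hbt (h ▸ hx))
      simp only [List.filter_cons]
      by_cases hQ : Q a <;> by_cases hP : P a <;> simp [hQ, hP, heq]
    · have hba : b ≠ a := by
        intro h; exact (List.nodup_cons.mp hnd).1 (h ▸ hat)
      have hPQ : P b = Q b := hother b (List.mem_cons_self) hba
      have := ih (List.nodup_cons.mp hnd).2 hat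
        (fun x hx hxa => hother x (List.mem_cons_of_mem b hx) hxa)
      simp only [List.filter_cons, ← hPQ]
      by_cases hP : P b <;> simp [hP, this] <;> omega

lemma satOf_insert (need cnt : PySem.Dict String Int) (hnd : need.keys.Nodup)
    (k : String) (v : Int) :
    satOf need (cnt.insert k v) = satOf need cnt +
      (match need.get? k with
       | none => 0
       | some m => (if m ≤ v then 1 else 0) - (if m ≤ cnt.getD k 0 then 1 else 0)) := by
  have hitems : need.items.Nodup := by
    have : (need.items.map Prod.fst).Nodup := hnd
    exact this.of_map
  cases hg : need.get? k with
  | none =>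
    have hkey : ∀ p ∈ need.items, p.1 ≠ k := by
      intro p hp h
      rw [PySem.Dict.get?_eq_none_iff_not_mem_keys] at hg
      exact hg (h ▸ PySem.Dict.mem_keys_of_mem_items need hp)
    unfold satOf
    have : need.items.filter (fun p => decide (p.2 ≤ (cnt.insert k v).getD p.1 0))
         = need.items.filter (fun p => decide (p.2 ≤ cnt.getD p.1 0)) := by
      apply List.filter_congr
      intro p hp
      rw [PySem.Dict.getD_insert_of_ne cnt v 0 (hkey p hp)]
    rw [this]
    simp
  | some m =>
    have hmem : (k, m) ∈ need.items := PySem.Dict.mem_items_of_get?_eq_some need hg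
    have hother : ∀ b ∈ need.items, b ≠ (k, m) →
        (fun p => decide (p.2 ≤ cnt.getD p.1 0)) b
          = (fun p => decide (p.2 ≤ (cnt.insert k v).getD p.1 0)) b := by
      intro b hb hbne
      have hbk : b.1 ≠ k := by
        intro h
        have := PySem.Dict.get?_of_mem_items need (k := b.1) (v := b.2) (by exact hb) hnd
        rw [h, hg] at this
        exact hbne (Prod.ext h (Option.some_inj.mp this).symm)
      simp only []
      rw [PySem.Dict.getD_insert_of_ne cnt v 0 hbk]
    have := filter_len_update need.items
      (fun p => decide (p.2 ≤ cnt.getD p.1 0))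
      (fun p => decide (p.2 ≤ (cnt.insert k v).getD p.1 0))
      (k, m) hitems hmem hother
    unfold satOf
    rw [this]
    have h1 : (cnt.insert k v).getD k 0 = v := PySem.Dict.getD_insert_self cnt k v 0
    simp only [h1]
    by_cases h2 : m ≤ v <;> by_cases h3 : m ≤ cnt.getD k 0 <;> simp [h2, h3] <;> omega

lemma satOf_empty (need : PySem.Dict String Int) :
    satOf need PySem.Dict.empty = ((need.values.filter (fun n => decide (n ≤ 0))).length : Int) := by
  unfold satOf
  have h1 : ∀ p : String × Int, PySem.Dict.empty.getD p.1 (0 : Int) = 0 := by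
    intro p; simp [PySem.Dict.getD_empty]
  have : need.items.filter (fun p => decide (p.2 ≤ PySem.Dict.empty.getD p.1 0))
       = need.items.filter (fun p => decide (p.2 ≤ 0)) := by
    apply List.filter_congr
    intro p _
    rw [h1 p]
  rw [this]
  rw [show need.values = need.items.map Prod.snd from rfl]
  rw [List.filter_map, List.length_map]
  rfl

lemma satOf_insert_add (need cnt : PySem.Dict String Int) (hnd : need.keys.Nodup) (k : String) :
    satOf need (cnt.insert k (cnt.getD k 0 + 1)) =
      (match need.get? k with
       | some m => if m = cnt.getD k 0 + 1 then satOf need cnt + 1 else satOf need cnt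
       | none => satOf need cnt) := by
  rw [satOf_insert need cnt hnd k (cnt.getD k 0 + 1)]
  rcases hg : need.get? k with _ | m
  · simp
  · simp only []
    split_ifs <;> norm_num at * <;> omega

lemma satOf_insert_sub (need cnt : PySem.Dict String Int) (hnd : need.keys.Nodup) (k : String) :
    satOf need (cnt.insert k (cnt.getD k 0 - 1)) =
      (match need.get? k with
       | some m => if m = cnt.getD k 0 then satOf need cnt - 1 else satOf need cnt
       | none => satOf need cnt) := by
  rw [satOf_insert need cnt hnd k (cnt.getD k 0 - 1)]
  rcases hg : need.get? k with _ | m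
  · simp
  · simp only []
    split_ifs <;> norm_num at * <;> (first | omega | linarith)

lemma all_iff_sat (z : List (String × Int)) (cnt : PySem.Dict String Int) :
    (((z.map (fun p => decide (cnt.getD p.1 0 ≥ p.2))).all id) = true)
      ↔ (satOf (solBNeed z) cnt = ((solBNeed z).size : Int)) := by
  rw [satOf_eq_size_iff, ← need_char]
  simp [List.all_eq_true, ge_iff_le]


lemma loop_eq (z : List (String × Int)) (discount : List String) :
    ∀ (rest pre : List String), discount = pre ++ rest →
    ∀ (c : Int) (d : PySem.Dict String Int),
    (rest.foldl (solAStep z) (c, pre.drop (pre.length - 10), d)).1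
      = ((PySem.List.enumerate rest (pre.length : Int)).foldl
          (solBStep (solBNeed z) ((solBNeed z).size : Int) discount)
          (c, d, satOf (solBNeed z) d)).1 := by
  intro rest
  induction rest with
  | nil => intro pre hpre c d; rfl
  | cons item rest' ih =>
    intro pre hpre c d
    have hnd := nodup_keys_solBNeed z
    rw [PySem.List.enumerate_cons, List.foldl_cons, List.foldl_cons]
    have hpre' : discount = (pre ++ [item]) ++ rest' := by rw [hpre]; simp
    have hlen' : ((pre.length : Int) + 1) = (((pre ++ [item]).length : Int)) := by
      simp
    by_cases hge : 10 ≤ pre.length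
    · -- window is full: A pops the head, B decrements discount[i-10]
      have hidx : pre.length - 10 < pre.length := by omega
      have hqlen : ((pre.drop (pre.length - 10)).length == 10) = true := by
        simp [List.length_drop]; omega
      have holdA : (pre.drop (pre.length - 10)).headD "" = pre.getD (pre.length - 10) "" := by
        rw [List.headD_eq_head?_getD, List.head?_drop, List.getD_eq_getElem?_getD]
      have holdB : PySem.List.pyGetD discount ((pre.length : Int) - 10) ""
          = pre.getD (pre.length - 10) "" := by
        have hcast : ((pre.length : Int) - 10) = ((pre.length - 10 : Nat) : Int) := by omega
        rw [hcast, PySem.List.pyGetD_natCast, hpre, List.getD_eq_getElem?_getD,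
          List.getElem?_append_left hidx, List.getD_eq_getElem?_getD]
      set old := pre.getD (pre.length - 10) "" with hold
      have hgeI : ((pre.length : Int) ≥ 10) := by exact_mod_cast hge
      -- the two steps
      have hA : solAStep z (c, pre.drop (pre.length - 10), d) item =
          (if ((z.map (fun p => decide (((d.insert old (d.getD old 0 - 1)).insert item
              ((d.insert old (d.getD old 0 - 1)).getD item 0 + 1)).getD p.1 0 ≥ p.2))).all id)
            then c + 1 else c,
           (pre.drop (pre.length - 10)).tail ++ [item],
           (d.insert old (d.getD old 0 - 1)).insert item
              ((d.insert old (d.getD old 0 - 1)).getD item 0 + 1)) := by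
        simp only [solAStep, hqlen, holdA, if_true]
      have hsat1 : (match (solBNeed z).get? old with
          | some m => if m = d.getD old 0 then satOf (solBNeed z) d - 1 else satOf (solBNeed z) d
          | none => satOf (solBNeed z) d)
          = satOf (solBNeed z) (d.insert old (d.getD old 0 - 1)) :=
        (satOf_insert_sub (solBNeed z) d hnd old).symm
      have hsat2 : (match (solBNeed z).get? item with
          | some m => if m = (d.insert old (d.getD old 0 - 1)).getD item 0 + 1
              then satOf (solBNeed z) (d.insert old (d.getD old 0 - 1)) + 1
              else satOf (solBNeed z) (d.insert old (d.getD old 0 - 1))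
          | none => satOf (solBNeed z) (d.insert old (d.getD old 0 - 1)))
          = satOf (solBNeed z) ((d.insert old (d.getD old 0 - 1)).insert item
              ((d.insert old (d.getD old 0 - 1)).getD item 0 + 1)) :=
        (satOf_insert_add (solBNeed z) (d.insert old (d.getD old 0 - 1)) hnd item).symm
      have hB : solBStep (solBNeed z) ((solBNeed z).size : Int) discount
            (c, d, satOf (solBNeed z) d) ((pre.length : Int), item) =
          (if satOf (solBNeed z) ((d.insert old (d.getD old 0 - 1)).insert item
              ((d.insert old (d.getD old 0 - 1)).getD item 0 + 1)) = ((solBNeed z).size : Int)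
            then c + 1 else c,
           (d.insert old (d.getD old 0 - 1)).insert item
              ((d.insert old (d.getD old 0 - 1)).getD item 0 + 1),
           satOf (solBNeed z) ((d.insert old (d.getD old 0 - 1)).insert item
              ((d.insert old (d.getD old 0 - 1)).getD item 0 + 1))) := by
        simp only [solBStep, if_pos hgeI, holdB, hsat1, hsat2]
      have hcnt : (if ((z.map (fun p => decide (((d.insert old (d.getD old 0 - 1)).insert item
              ((d.insert old (d.getD old 0 - 1)).getD item 0 + 1)).getD p.1 0 ≥ p.2))).all id)
            then c + 1 else c)
          = (if satOf (solBNeed z) ((d.insert old (d.getD old 0 - 1)).insert item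
              ((d.insert old (d.getD old 0 - 1)).getD item 0 + 1)) = ((solBNeed z).size : Int)
            then c + 1 else c) := by
        by_cases hof : satOf (solBNeed z) ((d.insert old (d.getD old 0 - 1)).insert item
            ((d.insert old (d.getD old 0 - 1)).getD item 0 + 1)) = ((solBNeed z).size : Int)
        · rw [if_pos ((all_iff_sat z _).mpr hof), if_pos hof]
        · rw [if_neg (fun h => hof ((all_iff_sat z _).mp h)), if_neg hof]
      rw [hA, hB, hcnt]
      have hq2 : (pre.drop (pre.length - 10)).tail ++ [item]
          = (pre ++ [item]).drop ((pre ++ [item]).length - 10) := by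
        rw [List.tail_drop]
        have h1 : pre.length - 10 + 1 = pre.length - 9 := by omega
        have h2 : (pre ++ [item]).length - 10 = pre.length - 9 := by
          simp only [List.length_append, List.length_cons, List.length_nil]; omega
        rw [h1, h2, List.drop_append_of_le_length (by omega)]
      rw [hq2, hlen']
      exact ih (pre ++ [item]) hpre' _ _
    · -- window not yet full: no pop on either side
      have hlt : pre.length < 10 := by omega
      have hq : pre.drop (pre.length - 10) = pre := by
        have : pre.length - 10 = 0 := by omega
        rw [this, List.drop_zero]
      have hqlen : ((pre.drop (pre.length - 10)).length == 10) = false := by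
        simp [List.length_drop]; omega
      have hgeI : ¬ ((pre.length : Int) ≥ 10) := by
        simp; exact_mod_cast hlt
      have hA : solAStep z (c, pre.drop (pre.length - 10), d) item =
          (if ((z.map (fun p => decide ((d.insert item (d.getD item 0 + 1)).getD p.1 0 ≥ p.2))).all id)
            then c + 1 else c,
           pre.drop (pre.length - 10) ++ [item],
           d.insert item (d.getD item 0 + 1)) := by
        simp only [solAStep, hqlen, Bool.false_eq_true, if_false]
      have hsat2 : (match (solBNeed z).get? item with
          | some m => if m = d.getD item 0 + 1 then satOf (solBNeed z) d + 1 else satOf (solBNeed z) d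
          | none => satOf (solBNeed z) d)
          = satOf (solBNeed z) (d.insert item (d.getD item 0 + 1)) :=
        (satOf_insert_add (solBNeed z) d hnd item).symm
      have hB : solBStep (solBNeed z) ((solBNeed z).size : Int) discount
            (c, d, satOf (solBNeed z) d) ((pre.length : Int), item) =
          (if satOf (solBNeed z) (d.insert item (d.getD item 0 + 1)) = ((solBNeed z).size : Int)
            then c + 1 else c,
           d.insert item (d.getD item 0 + 1),
           satOf (solBNeed z) (d.insert item (d.getD item 0 + 1))) := by
        simp only [solBStep, if_neg hgeI, hsat2]
      have hcnt : (if ((z.map (fun p => decide ((d.insert item (d.getD item 0 + 1)).getD p.1 0 ≥ p.2))).all id)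
            then c + 1 else c)
          = (if satOf (solBNeed z) (d.insert item (d.getD item 0 + 1)) = ((solBNeed z).size : Int)
            then c + 1 else c) := by
        by_cases hof : satOf (solBNeed z) (d.insert item (d.getD item 0 + 1)) = ((solBNeed z).size : Int)
        · rw [if_pos ((all_iff_sat z _).mpr hof), if_pos hof]
        · rw [if_neg (fun h => hof ((all_iff_sat z _).mp h)), if_neg hof]
      rw [hA, hB, hcnt]
      have hq2 : pre.drop (pre.length - 10) ++ [item]
          = (pre ++ [item]).drop ((pre ++ [item]).length - 10) := by
        rw [hq]
        have h2 : (pre ++ [item]).length - 10 = 0 := by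
          simp only [List.length_append, List.length_cons, List.length_nil]; omega
        rw [h2, List.drop_zero]
      rw [hq2, hlen']
      exact ih (pre ++ [item]) hpre' _ _

-- ===== VERDICT (by name: the statement is the Claim_ definition above) =====
theorem solution_spec : Claim_equal_solution := by
  intro wants numbers discount _
  unfold Spec_solution solution solution_alt
  have h := loop_eq (wants.zip numbers) discount discount [] rfl 0 PySem.Dict.empty
  simpa [satOf_empty] using h
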